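-- pv_equiv track=rewrite | github.com/zhouhongf/mybanks_files | utils/file_util.py | check_list_table
-- ===== SOURCE A (Python) =====
-- def check_list_table(list_tables):
--     list_tables_checked = []
--     if len(list_tables) == 0:
--         return list_tables_checked
--
--     for index, table in enumerate(list_tables):
--         # 兴业银行：期次款数；江苏银行：子份额
--         list_product_name = ['名称', '子份额', '期次款数']
--         list_product_code = ['代码', '编码', '编号']
--         name_in = False
--         code_in = False
--         table_content = []
--         for row in table:
--             if row:  # 此处过滤掉空集合的row
--                 label = row[0]  # 此处没有检查label是否为空值
--                 value = row[1] if len(row) > 1 else ''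
--                 value = value or ''  # 去除value等于None的结果，将None替换为''值
--                 # !!!! 如果表格列数超过2列，则把后面列的单元格里的内容，加在第二个单元格内容中，以空格区分
--                 if len(row) > 2:
--                     for i in range(2, len(row)):
--                         if row[i]:
--                             value += ('\t' + row[i])
--
--                 row_content = [label, value]
--                 table_content.append(row_content)
--
--                 if label:
--                     for name in list_product_name:
--                         if name in label:
--                             name_in = True
--                             break
--                     for code in list_product_code:
--                         if code in label:
--                             code_in = True
--                             break
--                 if value:
--                     for code in list_product_code:
--                         if code in value:
--                             code_in = True
--                             break
--
--         # 只有同时存在产品名称和产品编号的table，可以直接添加进list_tables_checked集合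
--         if name_in and code_in:
--             list_tables_checked.append(table_content)
--         else:
--             # 否则，从list_tables_checked集合中取出最后一个合格的table，加在后面
--             if len(list_tables_checked) > 0:
--                 last_table = list_tables_checked[-1]
--                 list_tables_checked = list_tables_checked[:-1]
--
--                 last_table += table_content  # last_table合并当前的table集合
--                 list_tables_checked.append(last_table)  # 再重新添加进list_tables_checked集合
--             else:
--                 # ！！！如果list_tables_checked还是空集合
--                 # if name_in or code_in:                        # 是否要设置条件：允许放入一张只含有产品名称或只含有产品编号的表格作为第一张表格 ？？？
--                 list_tables_checked.append(table_content)  # 如果list_tables_checked还是空集合，则直接添加表格进去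
--     return list_tables_checked
-- ===== SOURCE B (Python) =====
-- def check_list_table(list_tables):
--     names = ['名称', '子份额', '期次款数']
--     codes = ['代码', '编码', '编号']
--
--     # phase 1: parse every table into (content, qualifies)
--     parsed = []
--     for table in list_tables:
--         content = []
--         for r in table:
--             if r:
--                 first = (r[1] if len(r) > 1 else '') or ''
--                 content.append([r[0], '\t'.join([first] + [c for c in r[2:] if c])])
--         labels = [lab or '' for lab, _ in content]
--         q = any(n in lab for n in names for lab in labels) and \
--             any(c in lab or c in val for c in codes for lab, (_, val) in zip(labels, content))
--         parsed.append((content, q))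
--
--     if not parsed:
--         return []
--
--     # phase 2: build the output back-to-front: walking the tail reversed, a
--     # qualifying table emits (its content + pending) as a new group; a
--     # non-qualifying one is prepended to pending; the first table always emits.
--     groups, pending = [], []
--     for content, q in reversed(parsed[1:]):
--         if q:
--             groups = [content + pending] + groups
--             pending = []
--         else:
--             pending = content + pending
--     return [parsed[0][0] + pending] + groups
-- ===== Notes on version B (the rewrite author's own statement) =====
-- stated objective: alternative
-- what changed: A's fused single pass with sticky per-row flags and in-place merge-into-last is replaced by a parse phase (value built by '\t'.join over a filtered cell list, qualification by any() over labels/values) followed by a back-to-front reverse walk that accumulates non-qualifying contents in a pending buffer and emits a group at each qualifying table (the first table always emits).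
-- outside the precondition, e.g. on check_list_table([[[None, 'x']]]): A returns [[[None, 'x']]], B returns [[[None, 'x']]]
import Mathlib
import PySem

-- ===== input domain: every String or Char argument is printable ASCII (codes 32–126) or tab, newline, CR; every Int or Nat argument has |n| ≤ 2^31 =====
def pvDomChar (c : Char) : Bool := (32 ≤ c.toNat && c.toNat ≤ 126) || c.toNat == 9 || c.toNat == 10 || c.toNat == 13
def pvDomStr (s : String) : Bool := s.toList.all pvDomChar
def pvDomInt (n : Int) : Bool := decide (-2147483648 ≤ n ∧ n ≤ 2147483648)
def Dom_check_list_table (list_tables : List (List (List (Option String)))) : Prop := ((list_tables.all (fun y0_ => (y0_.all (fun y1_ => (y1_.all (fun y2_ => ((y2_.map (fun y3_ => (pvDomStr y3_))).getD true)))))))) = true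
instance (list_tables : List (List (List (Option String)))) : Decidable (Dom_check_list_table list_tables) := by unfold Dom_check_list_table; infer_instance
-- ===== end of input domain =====

-- B replaces A's fused sticky-flag pass + merge-into-last with a parse phase (join over filtered cells, any() qualification) and a back-to-front reverse walk with a pending buffer; same values, alternative decomposition.


-- ===== PORT A =====
-- literal transliteration of A: one pass; per table an inner fold carrying the
-- sticky flags (name_in, code_in) and table_content, then the append/merge step.
-- 'n in label' (Python substring test) is ported as PySem.Str.isIn n label (exact).
-- Under Pre_ below, row[0] is never None, so '.getD ""' is exact ('if label:' skips '' anyway).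
def check_list_table (list_tables : List (List (List (Option String)))) : List (List (List String)) :=
  if list_tables.length = 0 then []
  else
    list_tables.foldl (fun checked table =>
      let st := table.foldl (fun (st : Bool × Bool × List (List String)) row =>
        if row.isEmpty then st
        else
          let label := (row.headD none).getD ""
          let value := if 1 < row.length then (row.getD 1 none).getD "" else ""
          -- for i in range(2, len(row)): if row[i]: value += '\t' + row[i]
          let value := (row.drop 2).foldl (fun v cell =>
            match cell with
            | some s => if s ≠ "" then v ++ "\t" ++ s else v
            | none => v) value
          let name_in := st.1 || ((label != "") && ["名称", "子份额", "期次款数"].any (fun n => PySem.Str.isIn n label))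
          let code_in := st.2.1 || ((label != "") && ["代码", "编码", "编号"].any (fun c => PySem.Str.isIn c label))
          let code_in := code_in || ((value != "") && ["代码", "编码", "编号"].any (fun c => PySem.Str.isIn c value))
          (name_in, code_in, st.2.2 ++ [[label, value]])) (false, false, [])
      if st.1 && st.2.1 then checked ++ [st.2.2]
      else if 0 < checked.length then checked.dropLast ++ [checked.getLastD [] ++ st.2.2]
      else checked ++ [st.2.2]) []

-- ===== PORT B =====
-- phase 1: parse each table into (content, qualifies);
-- value = '\t'.join([first] + [c for c in r[2:] if c])
def pvParseRow_alt (row : List (Option String)) : List String :=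
  let first := if 1 < row.length then (row.getD 1 none).getD "" else ""
  let tail := (row.drop 2).filterMap (fun cell =>
    match cell with
    | some s => if s ≠ "" then some s else none
    | none => none)
  [(row.headD none).getD "", PySem.Str.join "\t" (first :: tail)]

def pvParse_alt (table : List (List (Option String))) : List (List String) × Bool :=
  let content := (table.filter (fun r => !r.isEmpty)).map pvParseRow_alt
  let labels := content.map (fun rc => rc.headD "")
  let q := (["名称", "子份额", "期次款数"].any (fun n => labels.any (fun lab => PySem.Str.isIn n lab)))
        && (["代码", "编码", "编号"].any (fun c => (labels.zip content).any (fun p => PySem.Str.isIn c p.1 || PySem.Str.isIn c (p.2.getD 1 ""))))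
  (content, q)

-- phase 2: back-to-front over the tail of the parsed list with a pending
-- buffer; a qualifying table emits (content + pending) as a new group,
-- a non-qualifying one joins pending; the head table always emits.
def check_list_table_alt (list_tables : List (List (List (Option String)))) : List (List (List String)) :=
  match list_tables with
  | [] => []
  | t :: ts =>
    let p := pvParse_alt t
    let rest := ts.map pvParse_alt
    let st := rest.reverse.foldl (fun (st : List (List (List String)) × List (List String)) q =>
      if q.2 then ((q.1 ++ st.2) :: st.1, []) else (st.1, q.1 ++ st.2)) ([], [])
    (p.1 ++ st.2) :: st.1

-- ===== PRECONDITION & SPEC =====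
-- Pre_ excludes inputs where some nonempty row has None in its first cell: there A returns
-- a list containing None, which is not a value of the declared List String row type.
def Pre_check_list_table (list_tables : List (List (List (Option String)))) : Prop :=
  ∀ table ∈ list_tables, ∀ row ∈ table, ¬row.isEmpty → (row.headD none).isSome = true
instance (list_tables : List (List (List (Option String)))) : Decidable (Pre_check_list_table list_tables) := by unfold Pre_check_list_table; infer_instance

def pvWitness_check_list_table : List (List (List (Option String))) :=
  [[[some "product name", some "p1"], [some "code", none]], [[some "rate", some "3.5%", some "note"]]]

def Spec_check_list_table (list_tables : List (List (List (Option String)))) (out : List (List (List String))) : Prop := out = check_list_table_alt list_tables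
instance (list_tables : List (List (List (Option String)))) (out : List (List (List String))) : Decidable (Spec_check_list_table list_tables out) := by unfold Spec_check_list_table; infer_instance

-- ===== CLAIM (what is proved, stated in full; the proofs are below) =====
def Claim_equal_check_list_table : Prop := ∀ (list_tables : List (List (List (Option String)))), Dom_check_list_table list_tables → Pre_check_list_table list_tables → Spec_check_list_table list_tables (check_list_table list_tables)

-- ===== LEMMAS AND PROOFS =====

-- abbreviations for the per-row values and substring tests (definitionally those in port A)
def pvLab (row : List (Option String)) : String := (row.headD none).getD ""
def pvVal (row : List (Option String)) : String :=
  (row.drop 2).foldl (fun v cell =>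
    match cell with
    | some s => if s ≠ "" then v ++ "\t" ++ s else v
    | none => v) (if 1 < row.length then (row.getD 1 none).getD "" else "")
def pvAnyName (s : String) : Bool := ["名称", "子份额", "期次款数"].any (fun n => PySem.Str.isIn n s)
def pvAnyCode (s : String) : Bool := ["代码", "编码", "编号"].any (fun c => PySem.Str.isIn c s)

-- helper names for the row-parsing step functions (definitionally those in the ports)
def pvStepVal (v : String) (cell : Option String) : String :=
  match cell with
  | some s => if s ≠ "" then v ++ "\t" ++ s else v
  | none => v
def pvKeep (cell : Option String) : Option String :=
  match cell with
  | some s => if s ≠ "" then some s else none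
  | none => none

-- '\t'.join(first :: truthy-tail) equals A's incremental concatenation
lemma pv_join_cons (v s : String) (l : List String) :
    PySem.Str.join "\t" (v :: s :: l) = v ++ "\t" ++ PySem.Str.join "\t" (s :: l) := by
  apply String.ext
  simp [PySem.Str.toList_join, PySem.Chars.join_cons_cons]

lemma pv_foldl_pref (t : List String) : ∀ a b : String,
    t.foldl (fun x s => x ++ "\t" ++ s) (a ++ b) = a ++ t.foldl (fun x s => x ++ "\t" ++ s) b := by
  induction t with
  | nil => intro a b; rfl
  | cons u w ih =>
    intro a b
    rw [List.foldl_cons, List.foldl_cons,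
      show a ++ b ++ "\t" ++ u = a ++ (b ++ "\t" ++ u) from by
        rw [String.append_assoc, String.append_assoc, String.append_assoc],
      ih a (b ++ "\t" ++ u)]

lemma pv_join_foldl (l : List String) : ∀ v : String,
    PySem.Str.join "\t" (v :: l) = l.foldl (fun a s => a ++ "\t" ++ s) v := by
  induction l with
  | nil => intro v; simp [PySem.Str.join, PySem.Chars.join, List.intercalate]
  | cons s t ih =>
    intro v
    rw [pv_join_cons, ih s, List.foldl_cons]
    rw [show v ++ "\t" ++ s = (v ++ "\t") ++ s from by rw [String.append_assoc]]
    rw [pv_foldl_pref t (v ++ "\t") s, String.append_assoc]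

lemma pv_fold_filterMap (l : List (Option String)) : ∀ v : String,
    l.foldl pvStepVal v = (l.filterMap pvKeep).foldl (fun a s => a ++ "\t" ++ s) v := by
  induction l with
  | nil => intro v; rfl
  | cons c t ih =>
    intro v
    cases c with
    | none => rw [List.foldl_cons, List.filterMap_cons]; exact ih v
    | some s =>
      rw [List.foldl_cons, List.filterMap_cons]
      by_cases hs : s = ""
      · subst hs
        rw [show pvStepVal v (some "") = v from by simp [pvStepVal],
            show pvKeep (some "") = none from by simp [pvKeep]]
        exact ih v
      · rw [show pvStepVal v (some s) = v ++ "\t" ++ s from by simp [pvStepVal, hs],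
            show pvKeep (some s) = some s from by simp [pvKeep, hs]]
        rw [List.foldl_cons]
        exact ih _

lemma pvParseRow_eq (row : List (Option String)) : pvParseRow_alt row = [pvLab row, pvVal row] := by
  show [(row.headD none).getD "",
      PySem.Str.join "\t" ((if 1 < row.length then (row.getD 1 none).getD "" else "") ::
        (row.drop 2).filterMap pvKeep)] = [pvLab row, pvVal row]
  rw [pv_join_foldl, ← pv_fold_filterMap]
  rfl

-- named copies of the two fold bodies (definitionally those in the ports)
def pvInnerA (st : Bool × Bool × List (List String)) (row : List (Option String)) : Bool × Bool × List (List String) :=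
  if row.isEmpty then st
  else (st.1 || ((pvLab row != "") && pvAnyName (pvLab row)),
        (st.2.1 || ((pvLab row != "") && pvAnyCode (pvLab row))) || ((pvVal row != "") && pvAnyCode (pvVal row)),
        st.2.2 ++ [[pvLab row, pvVal row]])

def pvStepA (checked : List (List (List String))) (table : List (List (Option String))) : List (List (List String)) :=
  let st := table.foldl pvInnerA (false, false, [])
  if st.1 && st.2.1 then checked ++ [st.2.2]
  else if 0 < checked.length then checked.dropLast ++ [checked.getLastD [] ++ st.2.2]
  else checked ++ [st.2.2]

def pvStepB (res : List (List (List String))) (p : List (List String) × Bool) : List (List (List String)) :=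
  if p.2 then res ++ [p.1]
  else if 0 < res.length then res.dropLast ++ [res.getLastD [] ++ p.1]
  else res ++ [p.1]

-- row-level flags without the 'if label:' / 'if value:' guards
def pvRowName (row : List (Option String)) : Bool := pvAnyName (pvLab row)
def pvRowCode (row : List (Option String)) : Bool := pvAnyCode (pvLab row) || pvAnyCode (pvVal row)

lemma pv_guard_name (s : String) : ((s != "") && pvAnyName s) = pvAnyName s := by
  by_cases h : s = ""
  · subst h; decide
  · simp [h]

lemma pv_guard_code (s : String) : ((s != "") && pvAnyCode s) = pvAnyCode s := by
  by_cases h : s = ""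
  · subst h; decide
  · simp [h]

lemma pvInnerA_char (table : List (List (Option String))) :
    ∀ (n0 c0 : Bool) (cont0 : List (List String)),
      table.foldl pvInnerA (n0, c0, cont0) =
        (n0 || table.any (fun r => !r.isEmpty && pvRowName r),
         c0 || table.any (fun r => !r.isEmpty && pvRowCode r),
         cont0 ++ (table.filter (fun r => !r.isEmpty)).map pvParseRow_alt) := by
  induction table with
  | nil => intro n0 c0 cont0; simp
  | cons r t ih =>
    intro n0 c0 cont0
    by_cases hr : r.isEmpty = true
    · rw [List.foldl_cons, show pvInnerA (n0, c0, cont0) r = (n0, c0, cont0) from by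
        simp [pvInnerA, hr], ih]
      simp [hr, List.any_cons]
    · rw [List.foldl_cons, show pvInnerA (n0, c0, cont0) r =
        (n0 || ((pvLab r != "") && pvAnyName (pvLab r)),
         (c0 || ((pvLab r != "") && pvAnyCode (pvLab r))) || ((pvVal r != "") && pvAnyCode (pvVal r)),
         cont0 ++ [[pvLab r, pvVal r]]) from by simp [pvInnerA, hr], ih]
      simp only [List.any_cons, List.filter_cons, hr, Bool.not_false, if_pos, List.map_cons,
        Bool.true_and, Prod.mk.injEq, pv_guard_name, pv_guard_code,
        pvRowName, pvRowCode, pvParseRow_eq]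
      refine ⟨?_, ?_, ?_⟩
      · simp [Bool.or_assoc]
      · simp [Bool.or_assoc]
      · simp

lemma pvHead (row : List (Option String)) : (pvParseRow_alt row).headD "" = pvLab row := by
  rw [pvParseRow_eq]; rfl
lemma pvGet1 (row : List (Option String)) : (pvParseRow_alt row).getD 1 "" = pvVal row := by
  rw [pvParseRow_eq]; rfl

lemma pv_zip_map (l : List (List String)) :
    (l.map (fun rc => rc.headD "")).zip l = l.map (fun rc => (rc.headD "", rc)) := by
  induction l with
  | nil => rfl
  | cons x t ih => rw [List.map_cons, List.map_cons, List.zip_cons_cons, ih]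

lemma pv_any_swap {α β : Type} (ns : List α) (t : List β) (P : β → Bool) (f : α → β → Bool) :
    (ns.any fun n => t.any fun r => P r && f n r) = t.any fun r => P r && ns.any fun n => f n r := by
  rw [Bool.eq_iff_iff]
  simp only [List.any_eq_true, Bool.and_eq_true]
  constructor
  · rintro ⟨n, hn, r, hr, hP, hf⟩
    exact ⟨r, hr, hP, n, hn, hf⟩
  · rintro ⟨r, hr, hP, n, hn, hf⟩
    exact ⟨n, hn, r, hr, hP, hf⟩

lemma pv_any_orD {α : Type} (l : List α) (p q : α → Bool) :
    l.any (fun a => p a || q a) = (l.any p || l.any q) := by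
  induction l with
  | nil => rfl
  | cons a t ih => simp [List.any_cons, ih, Bool.or_assoc, Bool.or_left_comm]

lemma pv_qual (t : List (List (Option String))) :
    (pvParse_alt t).2 =
      (t.any (fun r => !r.isEmpty && pvRowName r) && t.any (fun r => !r.isEmpty && pvRowCode r)) := by
  show ((["名称", "子份额", "期次款数"].any fun n =>
        (((t.filter (fun r => !r.isEmpty)).map pvParseRow_alt).map (fun rc => rc.headD "")).any
          fun lab => PySem.Str.isIn n lab) &&
      ["代码", "编码", "编号"].any fun c =>
        ((((t.filter (fun r => !r.isEmpty)).map pvParseRow_alt).map (fun rc => rc.headD "")).zip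
              ((t.filter (fun r => !r.isEmpty)).map pvParseRow_alt)).any
          fun p => PySem.Str.isIn c p.1 || PySem.Str.isIn c (p.2.getD 1 "")) = _
  rw [pv_zip_map]
  simp only [List.any_map, Function.comp_def, pvHead, pvGet1, List.any_filter]
  congr 1
  · rw [pv_any_swap ["名称", "子份额", "期次款数"] t (fun r => !r.isEmpty)
      (fun n r => PySem.Str.isIn n (pvLab r))]
    rfl
  · rw [pv_any_swap ["代码", "编码", "编号"] t (fun r => !r.isEmpty)
      (fun c r => PySem.Str.isIn c (pvLab r) || PySem.Str.isIn c (pvVal r))]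
    simp only [pv_any_orD]
    rfl

lemma pv_step (res : List (List (List String))) (t : List (List (Option String))) :
    pvStepA res t = pvStepB res (pvParse_alt t) := by
  unfold pvStepA pvStepB
  rw [pvInnerA_char t false false []]
  simp only [Bool.false_or, List.nil_append]
  rw [← pv_qual]
  have hcont : (pvParse_alt t).1 = (t.filter (fun r => !r.isEmpty)).map pvParseRow_alt := rfl
  rw [← hcont]

-- the segmentation both phase-2 computations realise
def pvSeg (cur : List (List String)) : List (List (List String) × Bool) → List (List (List String))
  | [] => [cur]
  | p :: ps => if p.2 then cur :: pvSeg p.1 ps else pvSeg (cur ++ p.1) ps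

lemma pv_foldlB_seg (ps : List (List (List String) × Bool)) :
    ∀ (acc : List (List (List String))) (cur : List (List String)),
      List.foldl pvStepB (acc ++ [cur]) ps = acc ++ pvSeg cur ps := by
  induction ps with
  | nil => intro acc cur; rfl
  | cons p t ih =>
    intro acc cur
    by_cases hq : p.2 = true
    · rw [List.foldl_cons,
        show pvStepB (acc ++ [cur]) p = (acc ++ [cur]) ++ [p.1] from by simp [pvStepB, hq],
        ih (acc ++ [cur]) p.1]
      simp [pvSeg, hq]
    · rw [List.foldl_cons,
        show pvStepB (acc ++ [cur]) p = acc ++ [cur ++ p.1] from by simp [pvStepB, hq],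
        ih acc (cur ++ p.1)]
      simp [pvSeg, hq]

def pvGoStep (st : List (List (List String)) × List (List String)) (q : List (List String) × Bool) :
    List (List (List String)) × List (List String) :=
  if q.2 then ((q.1 ++ st.2) :: st.1, []) else (st.1, q.1 ++ st.2)

lemma pv_seg_go (ps : List (List (List String) × Bool)) :
    ∀ (cur : List (List String)),
      pvSeg cur ps =
        (cur ++ (ps.foldr (fun x y => pvGoStep y x) ([], [])).2)
          :: (ps.foldr (fun x y => pvGoStep y x) ([], [])).1 := by
  induction ps with
  | nil => intro cur; simp [pvSeg]
  | cons p t ih =>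
    intro cur
    by_cases hq : p.2 = true
    · simp only [pvSeg, hq, if_pos, List.foldr_cons]
      rw [ih p.1]
      simp [pvGoStep, hq]
    · simp only [pvSeg, hq, List.foldr_cons]
      rw [if_neg (by decide), ih (cur ++ p.1)]
      simp [pvGoStep, hq, List.append_assoc]

-- ===== VERDICT (by name: the statement is the Claim_ definition above) =====
theorem check_list_table_spec : Claim_equal_check_list_table := by
  intro list_tables _ _
  show check_list_table list_tables = check_list_table_alt list_tables
  cases list_tables with
  | nil => rfl
  | cons t ts =>
    show List.foldl pvStepA [] (t :: ts) =
      (let p := pvParse_alt t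
       let rest := ts.map pvParse_alt
       let st := rest.reverse.foldl (fun st q => pvGoStep st q) ([], [])
       (p.1 ++ st.2) :: st.1)
    have hAB : List.foldl pvStepA [] (t :: ts)
        = List.foldl pvStepB [] ((t :: ts).map pvParse_alt) := by
      rw [List.foldl_map]
      exact congrFun (congrFun (congrArg List.foldl
        (funext fun res => funext fun u => pv_step res u)) []) (t :: ts)
    rw [hAB]
    simp only [List.map_cons, List.foldl_cons]
    have h0 : pvStepB [] (pvParse_alt t) = [] ++ [(pvParse_alt t).1] := by
      unfold pvStepB; split_ifs <;> simp_all
    rw [h0, pv_foldlB_seg _ [] (pvParse_alt t).1, List.nil_append, pv_seg_go]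
    rw [List.foldl_reverse]
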